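-- pv_equiv track=rewrite | github.com/remusezequiel/Lic.-Ciencia-de-Datos | Algoritmos_Y_Estructuras_De_Datos/aed_1/Parciales/Segundo Parcial/python-recu-tn/solucion.py | geometrica2_mas_larga
-- ===== SOURCE A (Python) =====
-- def geometrica2_mas_larga (lista:list[int]) ->  tuple[int, int]:
--     long_max:int = 1
--     pos_fin:int = 0
--     long_actual:int = 1
--
--     for i in range(1, len(lista)):
--         if lista[i] == 2 * lista[i - 1]:
--             long_actual += 1
--             if long_actual > long_max:
--                 long_max = long_actual
--                 pos_fin = i
--         else:
--             long_actual = 1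
--
--     return (long_max, pos_fin)
-- ===== SOURCE B (Python) =====
-- def geometrica2_mas_larga(lista: list[int]) -> tuple[int, int]:
--     # Pass 1: split the list into maximal doubling runs as (length, end_index).
--     n = len(lista)
--     runs = []
--     start = 0
--     for i in range(1, n + 1):
--         if i == n or lista[i] != 2 * lista[i - 1]:
--             runs.append((i - start, i - 1))
--             start = i
--     # Pass 2: pick the first run of length >= 2 with the greatest length.
--     best = (1, 0)
--     for (length, end) in runs:
--         if length >= 2 and length > best[0]:
--             best = (length, end)
--     return best
-- ===== Notes on version B (the rewrite author's own statement) =====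
-- stated objective: alternative
-- what changed: B replaces A's single accumulator loop (tracking current run length and incremental best-update) by two phases: first split the list into maximal doubling runs as (length, end_index) pairs, then scan that run list for the first strictly longest run of length >= 2.
import Mathlib
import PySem

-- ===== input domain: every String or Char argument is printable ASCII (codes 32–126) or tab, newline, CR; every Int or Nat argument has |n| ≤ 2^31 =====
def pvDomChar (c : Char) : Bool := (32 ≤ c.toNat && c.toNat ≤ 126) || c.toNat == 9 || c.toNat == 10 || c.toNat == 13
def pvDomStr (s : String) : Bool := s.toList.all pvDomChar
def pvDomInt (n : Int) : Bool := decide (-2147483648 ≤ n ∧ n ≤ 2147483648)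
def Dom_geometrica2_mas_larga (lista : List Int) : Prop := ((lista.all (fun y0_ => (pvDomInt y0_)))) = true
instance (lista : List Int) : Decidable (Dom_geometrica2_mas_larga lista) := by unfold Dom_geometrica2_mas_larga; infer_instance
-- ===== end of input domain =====

-- B is an alternative decomposition of the same O(n) task: split into maximal doubling runs, then pick the best run.

-- ===== PORT A =====
-- A's loop body: state (long_max, pos_fin, long_actual), index i
def aStep (lista : List Int) (s : Int × Int × Int) (i : Int) : Int × Int × Int :=
  if PySem.List.pyGetD lista i 0 = 2 * PySem.List.pyGetD lista (i - 1) 0 then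
    let la := s.2.2 + 1
    if la > s.1 then (la, i, la) else (s.1, s.2.1, la)
  else (s.1, s.2.1, 1)

def geometrica2_mas_larga (lista : List Int) : Int × Int :=
  let r := (PySem.List.pyRange 1 (lista.length : Int) 1).foldl (aStep lista) (1, 0, 1)
  (r.1, r.2.1)

-- ===== PORT B =====
-- B's pass-1 loop body: state (runs, start); close the current run at a break or at the end
def bStep (lista : List Int) (s : List (Int × Int) × Int) (i : Int) : List (Int × Int) × Int :=
  if i = (lista.length : Int) ∨ ¬ (PySem.List.pyGetD lista i 0 = 2 * PySem.List.pyGetD lista (i - 1) 0) then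
    (s.1 ++ [(i - s.2, i - 1)], i)
  else s

-- B's pass-2 loop: first run of length ≥ 2 with strictly greatest length
def bBest (b : Int × Int) (rs : List (Int × Int)) : Int × Int :=
  rs.foldl (fun b r => if 2 ≤ r.1 ∧ b.1 < r.1 then r else b) b

def geometrica2_mas_larga_alt (lista : List Int) : Int × Int :=
  let rs := (PySem.List.pyRange 1 ((lista.length : Int) + 1) 1).foldl (bStep lista) ([], 0)
  bBest (1, 0) rs.1

-- ===== PRECONDITION & SPEC =====
def Spec_geometrica2_mas_larga (lista : List Int) (out : Int × Int) : Prop := out = geometrica2_mas_larga_alt lista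
instance (lista : List Int) (out : Int × Int) : Decidable (Spec_geometrica2_mas_larga lista out) := by unfold Spec_geometrica2_mas_larga; infer_instance

-- ===== CLAIM (what is proved, stated in full; the proofs are below) =====
def Claim_equal_geometrica2_mas_larga : Prop := ∀ (lista : List Int), Dom_geometrica2_mas_larga lista → Spec_geometrica2_mas_larga lista (geometrica2_mas_larga lista)

-- ===== LEMMAS AND PROOFS =====

-- the run list produced by B's pass 1 starting from index i with current run start `start`
def bRuns (lista : List Int) (i start : Int) : List (Int × Int) :=
  ((PySem.List.pyRange i ((lista.length : Int) + 1) 1).foldl (bStep lista) ([], start)).1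

-- B's pass-1 accumulator only appends: peel off the initial run list
lemma bStep_accum (lista : List Int) (l : List Int) (rs0 : List (Int × Int)) (s : Int) :
    l.foldl (bStep lista) (rs0, s) =
      (rs0 ++ (l.foldl (bStep lista) ([], s)).1, (l.foldl (bStep lista) ([], s)).2) := by
  induction l generalizing rs0 s with
  | nil => simp
  | cons x l ih =>
    simp only [List.foldl_cons]
    by_cases h : x = (lista.length : Int) ∨ ¬ (PySem.List.pyGetD lista x 0 = 2 * PySem.List.pyGetD lista (x - 1) 0)
    · simp only [bStep, if_pos h, List.nil_append]
      rw [ih (rs0 ++ [(x - s, x - 1)]) x, ih [(x - s, x - 1)] x]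
      simp
    · simp only [bStep, if_neg h]
      exact ih rs0 s

lemma bBest_cons (b : Int × Int) (r : Int × Int) (rs : List (Int × Int)) :
    bBest b (r :: rs) = bBest (if 2 ≤ r.1 ∧ b.1 < r.1 then r else b) rs := by
  simp [bBest]

-- Main loop invariant: from index i (1 ≤ i ≤ n), with the current run starting at `start < i`
-- and (lm0, pf0) the best over the already-closed runs (lm0 ≥ 1), A's remaining loop agrees
-- with B's best-selection over the remaining runs.
lemma key (lista : List Int) : ∀ (k : Nat) (i start : Nat), lista.length - i = k →
    1 ≤ i → i ≤ lista.length → start < i →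
    ∀ lm0 pf0 : Int, 1 ≤ lm0 →
    (let st : Int × Int × Int :=
        if (i : Int) - start > lm0 then ((i : Int) - start, (i : Int) - 1, (i : Int) - start)
        else (lm0, pf0, (i : Int) - start)
     let A := (PySem.List.pyRange i (lista.length : Int) 1).foldl (aStep lista) st
     (A.1, A.2.1) = bBest (lm0, pf0) (bRuns lista i start)) := by
  intro k
  induction k with
  | zero =>
    intro i start hk h1 hn hs lm0 pf0 hlm
    have hin : (i : Int) = (lista.length : Int) := by exact_mod_cast (show i = lista.length by omega)
    simp only
    rw [PySem.List.pyRange_one_eq_nil (by omega), bRuns, hin, PySem.List.pyRange_one_singleton]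
    simp only [List.foldl_cons, List.foldl_nil, bStep]
    rw [if_pos (Or.inl trivial)]
    simp only [List.nil_append]
    rw [bBest_cons]
    simp only [bBest, List.foldl_nil]
    have hs' : (start : Int) < (lista.length : Int) := by exact_mod_cast (show start < lista.length by omega)
    by_cases h : (lista.length : Int) - start > lm0
    · rw [if_pos h, if_pos (show (2:Int) ≤ ((lista.length : Int) - start, (lista.length : Int) - 1).1 ∧
          ((lm0, pf0).1 < ((lista.length : Int) - start, (lista.length : Int) - 1).1) from ⟨by omega, by omega⟩)]
    · rw [if_neg h, if_neg (show ¬ ((2:Int) ≤ ((lista.length : Int) - start, (lista.length : Int) - 1).1 ∧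
          ((lm0, pf0).1 < ((lista.length : Int) - start, (lista.length : Int) - 1).1)) from fun hh => absurd hh.2 (by omega))]
  | succ k ih =>
    intro i start hk h1 hn hs lm0 pf0 hlm
    have hlt : i < lista.length := by omega
    have hltI : (i : Int) < (lista.length : Int) := by exact_mod_cast hlt
    have hneI : (i : Int) ≠ (lista.length : Int) := by omega
    simp only
    rw [PySem.List.pyRange_one_cons hltI]
    have hrB : PySem.List.pyRange (i : Int) ((lista.length : Int) + 1) 1
        = (i : Int) :: PySem.List.pyRange ((i : Int) + 1) ((lista.length : Int) + 1) 1 :=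
      PySem.List.pyRange_one_cons (by omega)
    have hcast : ((i : Int) + 1) = ((i + 1 : Nat) : Int) := by push_cast; ring
    by_cases hc : PySem.List.pyGetD lista (i : Int) 0 = 2 * PySem.List.pyGetD lista ((i : Int) - 1) 0
    · -- the run continues through index i
      have hB : bRuns lista (i : Int) (start : Int) = bRuns lista ((i + 1 : Nat) : Int) (start : Int) := by
        simp only [bRuns, hrB, List.foldl_cons, bStep]
        rw [if_neg (by rintro (h | h); exact hneI h; exact h hc), hcast]
      rw [hB, List.foldl_cons]
      have hA : aStep lista
          (if (i : Int) - start > lm0 then ((i : Int) - start, (i : Int) - 1, (i : Int) - start)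
            else (lm0, pf0, (i : Int) - start)) (i : Int)
          = (if ((i + 1 : Nat) : Int) - start > lm0
              then (((i + 1 : Nat) : Int) - start, ((i + 1 : Nat) : Int) - 1, ((i + 1 : Nat) : Int) - start)
              else (lm0, pf0, ((i + 1 : Nat) : Int) - start)) := by
        simp only [aStep, if_pos hc]
        push_cast
        by_cases h1' : (i : Int) - start > lm0
        · rw [if_pos h1']
          simp only
          rw [if_pos (show ((i : Int) - start) + 1 > ((i : Int) - start, (i : Int) - 1, (i : Int) - start).1 by
                simp only; omega),
              if_pos (by omega)]
          simp only [Prod.mk.injEq]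
          and_intros <;> first | trivial | omega
        · rw [if_neg h1']
          simp only
          by_cases h2' : (i : Int) - start + 1 > lm0
          · rw [if_pos h2', if_pos (by omega)]
            simp only [Prod.mk.injEq]
            and_intros <;> first | trivial | omega
          · rw [if_neg h2', if_neg (by omega)]
            simp only [Prod.mk.injEq]
            and_intros <;> first | trivial | omega
      rw [hA]
      exact ih (i + 1) start (by omega) (by omega) (by omega) (by omega) lm0 pf0 hlm
    · -- the run breaks at index i: close run (i - start, i - 1), a new run starts at i
      have hB : bRuns lista (i : Int) (start : Int)
          = ((i : Int) - start, (i : Int) - 1) :: bRuns lista ((i + 1 : Nat) : Int) (i : Int) := by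
        simp only [bRuns, hrB, List.foldl_cons, bStep]
        rw [if_pos (Or.inr hc)]
        simp only [List.nil_append]
        rw [bStep_accum, hcast]
        simp
      rw [hB, bBest_cons, List.foldl_cons]
      set p := if 2 ≤ ((i : Int) - start, (i : Int) - 1).1 ∧ (lm0, pf0).1 < ((i : Int) - start, (i : Int) - 1).1
                 then ((i : Int) - start, (i : Int) - 1) else (lm0, pf0) with hp
      have hA : aStep lista
          (if (i : Int) - start > lm0 then ((i : Int) - start, (i : Int) - 1, (i : Int) - start)
            else (lm0, pf0, (i : Int) - start)) (i : Int)
          = (p.1, p.2, (1 : Int)) := by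
        simp only [aStep, if_neg hc, hp]
        by_cases h1' : (i : Int) - start > lm0
        · rw [if_pos h1', if_pos (show (2:Int) ≤ ((i : Int) - start, (i : Int) - 1).1 ∧
              ((lm0, pf0).1 < ((i : Int) - start, (i : Int) - 1).1) from ⟨by omega, by omega⟩)]
        · rw [if_neg h1', if_neg (show ¬ ((2:Int) ≤ ((i : Int) - start, (i : Int) - 1).1 ∧
              ((lm0, pf0).1 < ((i : Int) - start, (i : Int) - 1).1)) from fun hh => absurd hh.2 (by omega))]
      rw [hA]
      have hp1 : 1 ≤ p.1 := by
        rw [hp]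
        by_cases h : (2:Int) ≤ ((i : Int) - start, (i : Int) - 1).1 ∧ (lm0, pf0).1 < ((i : Int) - start, (i : Int) - 1).1
        · rw [if_pos h]
          exact le_trans (by norm_num) h.1
        · rw [if_neg h]
          exact hlm
      have hst : (p.1, p.2, (1 : Int))
          = (if ((i + 1 : Nat) : Int) - (i : Int) > p.1
              then (((i + 1 : Nat) : Int) - (i : Int), ((i + 1 : Nat) : Int) - 1, ((i + 1 : Nat) : Int) - (i : Int))
              else (p.1, p.2, ((i + 1 : Nat) : Int) - (i : Int))) := by
        rw [if_neg (by push_cast; omega)]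
        simp only [Prod.mk.injEq]
        and_intros <;> first | trivial | omega
      rw [hst]
      exact ih (i + 1) i (by omega) (by omega) (by omega) (by omega) p.1 p.2 hp1

-- ===== VERDICT (by name: the statement is the Claim_ definition above) =====
theorem geometrica2_mas_larga_spec : Claim_equal_geometrica2_mas_larga := by
  intro lista _
  unfold Spec_geometrica2_mas_larga
  cases lista with
  | nil => decide
  | cons x xs =>
    have hlen : 1 ≤ (x :: xs).length := by simp
    have hmain := key (x :: xs) ((x :: xs).length - 1) 1 0 (by omega) (le_refl 1) hlen (by omega) 1 0 (le_refl 1)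
    simp only at hmain
    rw [if_neg (by norm_num)] at hmain
    simp only [geometrica2_mas_larga, geometrica2_mas_larga_alt, bRuns] at hmain ⊢
    push_cast at hmain ⊢
    exact hmain
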